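-- pv_equiv track=rewrite | github.com/ungurnicoleta/Battleship-Hangman | Hangman/entities/sentance.py | __convert_to_hangman
-- ===== SOURCE A (Python) =====
-- def __convert_to_hangman(sentance):
--     sentance = sentance.split()  # transform to array of words
--     hangman = []
--     for word in sentance:
--         if len(list(word)) > 3:
--             t = list(word)  # transform word to array of letters
--             hangman.append(t[0])
--             for i in range(1, len(t) - 1):
--                 hangman.append("_")
--             hangman.append(t[-1])
--         else:
--             t = list(word)
--             for i in t:
--                 hangman.append(i)
--         hangman.append(" ")
--     return hangman
-- ===== SOURCE B (Python) =====
-- def __convert_to_hangman(sentance):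
--     # Single index-based scan: find each word's boundaries with two pointers,
--     # emit directly from the boundary indices; no split(), no word lists.
--     out = []
--     n = len(sentance)
--     i = 0
--     while i < n:
--         if sentance[i].isspace():
--             i += 1
--         else:
--             j = i
--             while j < n and not sentance[j].isspace():
--                 j += 1
--             if j - i > 3:
--                 out.append(sentance[i])
--                 out.extend('_' * (j - i - 2))
--                 out.append(sentance[j - 1])
--             else:
--                 out.extend(sentance[i:j])
--             out.append(' ')
--             i = j
--     return out
-- ===== Notes on version B (the rewrite author's own statement) =====
-- stated objective: alternative
-- what changed: Instead of splitting into a word list and looping over each word's characters, B does one index-based scan of the raw string with two pointers: it locates each word's boundary indices and emits the mask directly from the boundaries (first char, repeated underscores, last char), never materialising the words.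
import Mathlib
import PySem

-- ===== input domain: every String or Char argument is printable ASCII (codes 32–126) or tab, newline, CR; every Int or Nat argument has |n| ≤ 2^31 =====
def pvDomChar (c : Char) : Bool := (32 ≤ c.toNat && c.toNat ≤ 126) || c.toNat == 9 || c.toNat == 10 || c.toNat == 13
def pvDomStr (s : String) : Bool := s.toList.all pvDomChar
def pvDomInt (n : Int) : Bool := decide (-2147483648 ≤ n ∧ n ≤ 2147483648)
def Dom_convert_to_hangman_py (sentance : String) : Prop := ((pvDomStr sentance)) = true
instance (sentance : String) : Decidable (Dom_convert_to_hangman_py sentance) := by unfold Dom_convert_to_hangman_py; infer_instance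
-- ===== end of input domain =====

-- B replaces A's split-into-words + per-word character loops by one index-based scan of
-- the raw string with two pointers, emitting each mask from the boundary indices (alternative decomposition, same cost).

-- ===== PORT A =====
-- the body of A's 'for word in sentance' loop, acting on the accumulator 'hangman'
def convert_hangman_step (hangman : List String) (word : String) : List String :=
  let hangman :=
    if word.toList.length > 3 then
      let t := word.toList
      let h := hangman ++ [String.ofList [(PySem.List.pyGet? t 0).getD ' ']]
      let h := (PySem.List.pyRange 1 ((t.length : Int) - 1) 1).foldl
                 (fun acc _i => acc ++ ["_"]) h
      h ++ [String.ofList [(PySem.List.pyGet? t (-1)).getD ' ']]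
    else
      word.toList.foldl (fun acc i => acc ++ [String.ofList [i]]) hangman
  hangman ++ [" "]

def convert_to_hangman_py (sentance : String) : List String :=
  (PySem.Str.split₀ sentance).foldl convert_hangman_step []

-- ===== PORT B =====
-- the scan loop of Source B, transcribed as forward recursion over the remaining characters
-- (the two index pointers i, j only ever move forward; 'w' is the segment sentance[i:j]).
def hangman_scan : List Char → List String
  | [] => []
  | c :: cs =>
    if PySem.Chars.isspace c then hangman_scan cs
    else
      (if ((c :: cs).takeWhile (fun d => !PySem.Chars.isspace d)).length > 3 then
        [String.ofList [c]] ++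
          List.replicate (((c :: cs).takeWhile (fun d => !PySem.Chars.isspace d)).length - 2) "_" ++
          [String.ofList [((c :: cs).takeWhile (fun d => !PySem.Chars.isspace d)).getLastD ' ']]
      else
        ((c :: cs).takeWhile (fun d => !PySem.Chars.isspace d)).map (fun d => String.ofList [d])) ++
        [" "] ++ hangman_scan (cs.dropWhile (fun d => !PySem.Chars.isspace d))
termination_by l => l.length
decreasing_by
  · simp
  · have := List.length_dropWhile_le (p := fun d => !PySem.Chars.isspace d) (l := cs)
    simp; omega

def convert_to_hangman_py_alt (sentance : String) : List String :=
  hangman_scan sentance.toList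

-- ===== PRECONDITION & SPEC =====
def Spec_convert_to_hangman_py (sentance : String) (out : List String) : Prop := out = convert_to_hangman_py_alt sentance
instance (sentance : String) (out : List String) : Decidable (Spec_convert_to_hangman_py sentance out) := by unfold Spec_convert_to_hangman_py; infer_instance

-- ===== CLAIM (what is proved, stated in full; the proofs are below) =====
def Claim_equal_convert_to_hangman_py : Prop := ∀ (sentance : String), Dom_convert_to_hangman_py sentance → Spec_convert_to_hangman_py sentance (convert_to_hangman_py sentance)

-- ===== LEMMAS AND PROOFS =====

-- proof-side description of what both programs emit for one word
def hangman_emit (w : List Char) : List String :=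
  if w.length > 3 then
    [String.ofList [w.headD ' ']] ++ List.replicate (w.length - 2) "_" ++ [String.ofList [w.getLastD ' ']]
  else
    w.map (fun d => String.ofList [d])

theorem foldl_underscores (l : List Int) (init : List String) :
    l.foldl (fun acc _i => acc ++ ["_"]) init = init ++ List.replicate l.length "_" := by
  induction l generalizing init with
  | nil => simp
  | cons x xs ih => simp [ih, List.replicate_succ]

theorem flatten_map_singleton (w : List Char) (f : Char → String) :
    (List.map (fun x => [f x]) w).flatten = List.map f w := by
  induction w with
  | nil => simp
  | cons a l ih => simp [ih]

theorem step_eq (acc : List String) (w : List Char) :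
    convert_hangman_step acc (String.ofList w)
      = acc ++ (hangman_emit w ++ [" "]) := by
  unfold convert_hangman_step hangman_emit
  by_cases h : w.length > 3
  · obtain ⟨a, w', rfl⟩ : ∃ a w', w = a :: w' := by
      cases w with
      | nil => simp at h
      | cons a w' => exact ⟨a, w', rfl⟩
    have hn : (((a :: w').length : Int) - 1 - 1).toNat = (a :: w').length - 2 := by
      simp at h; omega
    have hl : (a :: w').getLast?.getD ' ' = (a :: w')[w'.length] := by
      rw [List.getLast?_eq_getElem?]; simp
    have h3 : 3 ≤ w'.length := by simp at h; omega
    simp only [foldl_underscores, PySem.List.length_pyRange_one]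
    simp [PySem.List.pyGet?, PySem.List.pyIdx?, hl, h3]
  · simp [h, flatten_map_singleton]

theorem fold_emit (ws : List (List Char)) (init : List String) :
    (ws.map String.ofList).foldl convert_hangman_step init
      = init ++ (ws.map (fun w => hangman_emit w ++ [" "])).flatten := by
  induction ws generalizing init with
  | nil => simp
  | cons w rest ih => simp [ih, step_eq]

-- characterisation of Python's str.split() (PySem.Chars.split₀) by three rewriting rules
theorem go_acc (cs cur : List Char) (acc : List (List Char)) :
    PySem.Chars.split₀.go cs cur acc = acc.reverse ++ PySem.Chars.split₀.go cs cur [] := by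
  induction cs generalizing cur acc with
  | nil =>
    by_cases h : cur.isEmpty <;> simp [PySem.Chars.split₀.go, h]
  | cons c cs ih =>
    by_cases hs : PySem.Chars.isspace c
    · by_cases h : cur.isEmpty
      · simp only [PySem.Chars.split₀.go, hs, h, if_true]
        exact ih [] acc
      · simp only [PySem.Chars.split₀.go, hs, h, if_true]
        rw [ih [] (cur.reverse :: acc), ih [] [cur.reverse]]
        simp
    · simp only [PySem.Chars.split₀.go, hs]
      exact ih (c :: cur) acc

theorem go_word (cs cur : List Char) (hcur : cur ≠ []) :
    PySem.Chars.split₀.go cs cur []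
      = (cur.reverse ++ cs.takeWhile (fun d => !PySem.Chars.isspace d))
          :: PySem.Chars.split₀.go (cs.dropWhile (fun d => !PySem.Chars.isspace d)) [] [] := by
  induction cs generalizing cur with
  | nil =>
    simp [PySem.Chars.split₀.go, List.isEmpty_iff, hcur]
  | cons c cs ih =>
    by_cases hs : PySem.Chars.isspace c
    · have hp : ((fun d => !PySem.Chars.isspace d) c) = false := by simp [hs]
      simp only [List.takeWhile_cons, List.dropWhile_cons, hp, if_false, Bool.false_eq_true]
      simp only [PySem.Chars.split₀.go, hs, if_true, List.isEmpty_iff, hcur, if_false]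
      rw [go_acc]
      simp
    · have hp : ((fun d => !PySem.Chars.isspace d) c) = true := by simp [hs]
      simp only [List.takeWhile_cons, List.dropWhile_cons, hp, if_true]
      simp only [PySem.Chars.split₀.go, hs]
      rw [ih (c :: cur) (by simp)]
      simp

theorem split₀_nil : PySem.Chars.split₀ [] = [] := by
  simp [PySem.Chars.split₀, PySem.Chars.split₀.go]

theorem split₀_cons_space (c : Char) (cs : List Char) (hs : PySem.Chars.isspace c) :
    PySem.Chars.split₀ (c :: cs) = PySem.Chars.split₀ cs := by
  simp [PySem.Chars.split₀, PySem.Chars.split₀.go, hs]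

theorem split₀_cons_word (c : Char) (cs : List Char) (hs : ¬ PySem.Chars.isspace c) :
    PySem.Chars.split₀ (c :: cs)
      = (c :: cs.takeWhile (fun d => !PySem.Chars.isspace d))
          :: PySem.Chars.split₀ (cs.dropWhile (fun d => !PySem.Chars.isspace d)) := by
  simp only [PySem.Chars.split₀, PySem.Chars.split₀.go, hs]
  rw [go_word cs [c] (by simp)]
  simp

theorem scan_eq (cs : List Char) :
    hangman_scan cs
      = ((PySem.Chars.split₀ cs).map (fun w => hangman_emit w ++ [" "])).flatten := by
  induction cs using hangman_scan.induct with
  | case1 => simp [hangman_scan, split₀_nil]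
  | case2 c cs hs ih =>
    rw [hangman_scan, if_pos hs, split₀_cons_space c cs hs, ih]
  | case3 c cs hs ih =>
    rw [hangman_scan, if_neg hs, split₀_cons_word c cs (by simpa using hs), ih]
    have hw : (c :: cs).takeWhile (fun d => !PySem.Chars.isspace d)
        = c :: cs.takeWhile (fun d => !PySem.Chars.isspace d) := by
      simp [hs]
    simp only [List.map_cons, List.flatten_cons, hw]
    unfold hangman_emit
    by_cases h3 : (c :: cs.takeWhile (fun d => !PySem.Chars.isspace d)).length > 3
    · simp [flatten_map_singleton]
    · simp [flatten_map_singleton]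

-- ===== VERDICT (by name: the statement is the Claim_ definition above) =====
theorem convert_to_hangman_py_spec : Claim_equal_convert_to_hangman_py := by
  intro s _
  unfold Spec_convert_to_hangman_py convert_to_hangman_py convert_to_hangman_py_alt
  rw [scan_eq]
  have : PySem.Str.split₀ s = (PySem.Chars.split₀ s.toList).map String.ofList := rfl
  rw [this, fold_emit]
  simp
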